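-- pv_equiv track=rewrite | github.com/AbdulHakeemPH40/cortex | src/utils/diff/diff_algorithm.py | find_adjacent_pairs
-- ===== SOURCE A (Python) =====
-- from typing import List, Tuple
--
-- def find_adjacent_pairs(markers: List[str]) -> List[Tuple[int, int]]:
--     """
--     Find adjacent delete/add line pairs for inline diff highlighting.
--
--     When you have consecutive deleted lines followed by added lines,
--     this pairs them up for side-by-side comparison.
--
--     Args:
--         markers: List of line markers ('-', '+', ' ')
--
--     Returns:
--         List of (deleted_line_index, added_line_index) pairs
--     """
--     pairs = []
--     i = 0
--     length = len(markers)
--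
--     while i < length:
--         if markers[i] == '-':
--             # Found start of deletion block
--             del_start = i
--             del_end = i
--
--             # Count consecutive deletions
--             while del_end < length and markers[del_end] == '-':
--                 del_end += 1
--
--             # Count consecutive additions after deletions
--             add_end = del_end
--             while add_end < length and markers[add_end] == '+':
--                 add_end += 1
--
--             del_count = del_end - del_start
--             add_count = add_end - del_end
--
--             # Pair them up (minimum of both counts)
--             if del_count > 0 and add_count > 0:
--                 n = min(del_count, add_count)
--                 for k in range(n):
--                     pairs.append((del_start + k, del_end + k))
--
--                 i = add_end
--             else:
--                 i = del_end
--         else: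
--             i += 1
--
--     return pairs
-- ===== SOURCE B (Python) =====
-- from typing import List, Tuple
--
-- def find_adjacent_pairs(markers: List[str]) -> List[Tuple[int, int]]:
--     """Two-pass version: build a table of maximal runs, then pair adjacent '-'/'+' runs."""
--     # Pass 1: run table of maximal runs as (marker, start_index, length).
--     runs = []
--     pos = 0
--     n = len(markers)
--     while pos < n:
--         end = pos + 1
--         while end < n and markers[end] == markers[pos]:
--             end += 1
--         runs.append((markers[pos], pos, end - pos))
--         pos = end
--     # Pass 2: each '-' run immediately followed by a '+' run yields min(len,len) pairs.
--     pairs = []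
--     for (c1, s1, n1), (c2, s2, n2) in zip(runs, runs[1:]):
--         if c1 == '-' and c2 == '+':
--             for k in range(min(n1, n2)):
--                 pairs.append((s1 + k, s2 + k))
--     return pairs
-- ===== Notes on version B (the rewrite author's own statement) =====
-- stated objective: alternative
-- what changed: Replaces A's single inline index-juggling scanner with a two-pass decomposition: first build a table of maximal runs (marker, start, length) in one scan, then pair each '-' run with an immediately following '+' run by zipping the run table with its tail.
import Mathlib
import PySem

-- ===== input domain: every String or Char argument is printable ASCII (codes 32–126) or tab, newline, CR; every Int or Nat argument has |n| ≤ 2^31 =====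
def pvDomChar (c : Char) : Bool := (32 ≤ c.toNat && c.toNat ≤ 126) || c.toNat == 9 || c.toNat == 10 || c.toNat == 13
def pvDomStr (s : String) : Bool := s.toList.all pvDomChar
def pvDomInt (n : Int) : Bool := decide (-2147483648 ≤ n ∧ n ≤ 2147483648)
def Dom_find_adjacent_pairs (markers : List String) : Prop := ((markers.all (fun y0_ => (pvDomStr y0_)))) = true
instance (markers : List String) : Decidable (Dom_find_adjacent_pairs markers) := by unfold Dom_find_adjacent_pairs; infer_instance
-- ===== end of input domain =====

-- B replaces A's inline scanner by a two-pass decomposition (run table, then pairing of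
-- adjacent runs); same O(n) cost, proved to return the same value on every input.

-- ===== PORT A =====
-- inner 'while del_end < length and markers[del_end] == c: del_end += 1' loops of A
def scanA (markers : List String) (c : String) (j : Nat) : Nat :=
  if _h : j < markers.length then
    if markers.getD j "" = c then scanA markers c (j + 1) else j
  else j
termination_by markers.length - j

theorem scanA_ge (markers : List String) (c : String) (j : Nat) : j ≤ scanA markers c j := by
  rw [scanA]
  split
  · split
    · exact le_trans (Nat.le_succ j) (scanA_ge markers c (j + 1))
    · exact le_refl j
  · exact le_refl j
termination_by markers.length - j

theorem scanA_gt (markers : List String) (c : String) (j : Nat)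
    (h1 : j < markers.length) (h2 : markers.getD j "" = c) : j + 1 ≤ scanA markers c j := by
  rw [scanA]
  simp only [h1, dif_pos, h2, if_pos]
  exact scanA_ge markers c (j + 1)

-- A's outer while loop over index i
def loopA (markers : List String) (i : Nat) : List (Int × Int) :=
  if hi : i < markers.length then
    if hm : markers.getD i "" = "-" then
      let del_start := i
      let del_end := scanA markers "-" i
      let add_end := scanA markers "+" del_end
      let del_count := del_end - del_start
      let add_count := add_end - del_end
      if del_count > 0 ∧ add_count > 0 then
        ((List.range (min del_count add_count)).map
          (fun k => ((del_start : Int) + k, (del_end : Int) + k))) ++ loopA markers add_end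
      else loopA markers del_end
    else loopA markers (i + 1)
  else []
termination_by markers.length - i
decreasing_by
  · have h1 := scanA_gt markers "-" i hi hm
    have h2 := scanA_ge markers "+" (scanA markers "-" i)
    omega
  · have h1 := scanA_gt markers "-" i hi hm
    omega
  · omega

def find_adjacent_pairs (markers : List String) : List (Int × Int) := loopA markers 0

-- ===== PORT B =====
-- inner 'while end < n and markers[end] == markers[pos]: end += 1' loop of B
def scanB (markers : List String) (pos : Nat) (e : Nat) : Nat :=
  if _h : e < markers.length then
    if markers.getD e "" = markers.getD pos "" then scanB markers pos (e + 1) else e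
  else e
termination_by markers.length - e

theorem scanB_ge (markers : List String) (pos e : Nat) : e ≤ scanB markers pos e := by
  rw [scanB]
  split
  · split
    · exact le_trans (Nat.le_succ e) (scanB_ge markers pos (e + 1))
    · exact le_refl e
  · exact le_refl e
termination_by markers.length - e

-- B's pass 1: the run table (marker, start, length), built from position pos
def runsB (markers : List String) (pos : Nat) : List (String × Nat × Nat) :=
  if _h : pos < markers.length then
    let e := scanB markers pos (pos + 1)
    (markers.getD pos "", pos, e - pos) :: runsB markers e
  else []
termination_by markers.length - pos
decreasing_by
  have := scanB_ge markers pos (pos + 1)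
  omega

-- B's pass 2: fold over zip(runs, runs[1:])
def find_adjacent_pairs_alt (markers : List String) : List (Int × Int) :=
  let runs := runsB markers 0
  (runs.zip runs.tail).foldl
    (fun acc p =>
      if p.1.1 = "-" ∧ p.2.1 = "+" then
        acc ++ (List.range (min p.1.2.2 p.2.2.2)).map
          (fun k => ((p.1.2.1 : Int) + k, (p.2.2.1 : Int) + k))
      else acc) []

-- ===== PRECONDITION & SPEC =====
def Spec_find_adjacent_pairs (markers : List String) (out : List (Int × Int)) : Prop := out = find_adjacent_pairs_alt markers
instance (markers : List String) (out : List (Int × Int)) : Decidable (Spec_find_adjacent_pairs markers out) := by unfold Spec_find_adjacent_pairs; infer_instance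

-- ===== CLAIM (what is proved, stated in full; the proofs are below) =====
def Claim_equal_find_adjacent_pairs : Prop := ∀ (markers : List String), Dom_find_adjacent_pairs markers → Spec_find_adjacent_pairs markers (find_adjacent_pairs markers)

-- ===== LEMMAS AND PROOFS =====

-- recursive form of B's pass 2
def pairRuns : List (String × Nat × Nat) → List (Int × Int)
  | r1 :: r2 :: rest =>
      (if r1.1 = "-" ∧ r2.1 = "+" then
        (List.range (min r1.2.2 r2.2.2)).map
          (fun k => ((r1.2.1 : Int) + k, (r2.2.1 : Int) + k))
      else []) ++ pairRuns (r2 :: rest)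
  | _ => []

theorem pairRuns_cons_of_ne (r : String × Nat × Nat) (rs : List (String × Nat × Nat))
    (h : r.1 ≠ "-") : pairRuns (r :: rs) = pairRuns rs := by
  cases rs with
  | nil => rfl
  | cons r2 rest => simp [pairRuns, h]

theorem foldl_zip_eq_pairRuns (runs : List (String × Nat × Nat)) (acc : List (Int × Int)) :
    (runs.zip runs.tail).foldl
      (fun acc p =>
        if p.1.1 = "-" ∧ p.2.1 = "+" then
          acc ++ (List.range (min p.1.2.2 p.2.2.2)).map
            (fun k => ((p.1.2.1 : Int) + k, (p.2.2.1 : Int) + k))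
        else acc) acc = acc ++ pairRuns runs := by
  match runs with
  | [] => simp [pairRuns]
  | [r] => simp [pairRuns]
  | r1 :: r2 :: rest =>
    simp only [List.tail_cons, List.zip_cons_cons, List.foldl_cons]
    have ih := foldl_zip_eq_pairRuns (r2 :: rest)
    simp only [List.tail_cons] at ih
    rw [ih]
    by_cases h : r1.1 = "-" ∧ r2.1 = "+"
    · simp [pairRuns, h, List.append_assoc]
    · simp [pairRuns, h]

theorem scanB_eq_scanA (markers : List String) (pos e : Nat) :
    scanB markers pos e = scanA markers (markers.getD pos "") e := by
  rw [scanB, scanA]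
  split
  · split
    · exact scanB_eq_scanA markers pos (e + 1)
    · rfl
  · rfl
termination_by markers.length - e

theorem scanA_eq_of_miss (markers : List String) (c : String) (j : Nat)
    (h : ¬ (j < markers.length ∧ markers.getD j "" = c)) : scanA markers c j = j := by
  rw [scanA]
  split
  · next h1 =>
    split
    · next h2 => exact absurd ⟨h1, h2⟩ h
    · rfl
  · rfl

theorem scanA_eq_of_hit (markers : List String) (c : String) (j : Nat)
    (h1 : j < markers.length) (h2 : markers.getD j "" = c) :
    scanA markers c j = scanA markers c (j + 1) := by
  rw [scanA]
  rw [dif_pos h1, if_pos h2]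

theorem scanA_stop (markers : List String) (c : String) (j : Nat)
    (h : scanA markers c j < markers.length) : markers.getD (scanA markers c j) "" ≠ c := by
  by_cases h1 : j < markers.length ∧ markers.getD j "" = c
  · rw [scanA_eq_of_hit markers c j h1.1 h1.2] at h ⊢
    exact scanA_stop markers c (j + 1) h
  · rw [scanA_eq_of_miss markers c j h1] at h ⊢
    intro hc
    exact h1 ⟨h, hc⟩
termination_by markers.length - j
decreasing_by
  have := h1.1
  omega

-- the heart: A's inline scanner from index i equals B's pairing of the run table from i
theorem loopA_eq_pairRuns (markers : List String) (i : Nat) :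
    loopA markers i = pairRuns (runsB markers i) := by
  rw [loopA, runsB]
  simp only []
  split
  · next hi =>
    rw [scanB_eq_scanA]
    split
    · next hm =>
      -- markers[i] = "-"
      set e1 := scanA markers "-" i with he1
      have he1' : scanA markers (markers.getD i "") (i + 1) = e1 := by
        rw [hm, he1, scanA_eq_of_hit markers "-" i hi hm]
      rw [he1']
      have hi1 : i + 1 ≤ e1 := scanA_gt markers "-" i hi hm
      by_cases h1 : e1 < markers.length
      · have hstop : markers.getD e1 "" ≠ "-" := scanA_stop markers "-" i h1
        rw [runsB]
        simp only [h1, dif_pos]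
        rw [scanB_eq_scanA]
        by_cases h2 : markers.getD e1 "" = "+"
        · -- a '+' run follows
          have he2 : scanA markers "+" e1 = scanA markers (markers.getD e1 "") (e1 + 1) := by
            rw [h2, scanA_eq_of_hit markers "+" e1 h1 h2]
          set e2 := scanA markers (markers.getD e1 "") (e1 + 1) with he2d
          have hgt2 : e1 + 1 ≤ e2 := by
            rw [← he2, ← h2 ] at *
            rw [he2d, ← scanA_eq_of_hit markers (markers.getD e1 "") e1 h1 rfl]
            exact scanA_gt markers (markers.getD e1 "") e1 h1 rfl
          rw [he2]
          have hcnt : e1 - i > 0 ∧ e2 - e1 > 0 := ⟨by omega, by omega⟩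
          simp only [hcnt, and_self, if_pos]
          rw [loopA_eq_pairRuns markers e2]
          show _ ++ pairRuns (runsB markers e2)
              = pairRuns ((markers.getD i "", i, e1 - i) :: (markers.getD e1 "", e1, e2 - e1) :: runsB markers e2)
          rw [show pairRuns ((markers.getD i "", i, e1 - i) :: (markers.getD e1 "", e1, e2 - e1) :: runsB markers e2)
              = (if markers.getD i "" = "-" ∧ markers.getD e1 "" = "+" then
                  (List.range (min (e1 - i) (e2 - e1))).map
                    (fun k => ((i : Int) + k, (e1 : Int) + k))
                else []) ++ pairRuns ((markers.getD e1 "", e1, e2 - e1) :: runsB markers e2) from rfl]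
          rw [pairRuns_cons_of_ne (markers.getD e1 "", e1, e2 - e1) (runsB markers e2) hstop]
          rw [if_pos ⟨hm, h2⟩]
        · -- run after the '-' run is neither '+' (nor '-'): no pairs from this block
          have he2 : scanA markers "+" e1 = e1 :=
            scanA_eq_of_miss markers "+" e1 (by intro h; exact h2 h.2)
          rw [he2]
          simp only [Nat.sub_self, gt_iff_lt, Nat.lt_irrefl, and_false, if_neg, not_false_iff]
          rw [loopA_eq_pairRuns markers e1]
          rw [runsB]
          simp only [h1, dif_pos]
          rw [scanB_eq_scanA]
          show pairRuns ((markers.getD e1 "", e1, _) :: runsB markers _)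
              = pairRuns ((markers.getD i "", i, e1 - i) :: (markers.getD e1 "", e1, _) :: runsB markers _)
          rw [show pairRuns ((markers.getD i "", i, e1 - i) :: (markers.getD e1 "", e1,
                scanA markers (markers.getD e1 "") (e1 + 1) - e1) ::
                runsB markers (scanA markers (markers.getD e1 "") (e1 + 1)))
              = (if markers.getD i "" = "-" ∧ markers.getD e1 "" = "+" then
                  (List.range (min (e1 - i) (scanA markers (markers.getD e1 "") (e1 + 1) - e1))).map
                    (fun k => ((i : Int) + k, (e1 : Int) + k))
                else []) ++ pairRuns ((markers.getD e1 "", e1,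
                  scanA markers (markers.getD e1 "") (e1 + 1) - e1) ::
                  runsB markers (scanA markers (markers.getD e1 "") (e1 + 1))) from rfl]
          rw [if_neg (fun hc => h2 hc.2), List.nil_append]

      · -- the '-' run reaches the end of the list
        have he2 : scanA markers "+" e1 = e1 :=
          scanA_eq_of_miss markers "+" e1 (by intro h; exact h1 h.1)
        rw [he2]
        simp only [Nat.sub_self, gt_iff_lt, Nat.lt_irrefl, and_false, if_neg, not_false_iff]
        rw [loopA_eq_pairRuns markers e1]
        rw [runsB]
        simp only [h1, dif_neg, not_false_iff]
        rfl
    · next hm =>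
      -- markers[i] ≠ "-": A skips one position; B's run table skips the whole run
      rw [loopA_eq_pairRuns markers (i + 1)]
      rw [pairRuns_cons_of_ne (markers.getD i "", i, scanA markers (markers.getD i "") (i + 1) - i)
        (runsB markers (scanA markers (markers.getD i "") (i + 1))) hm]
      by_cases h1 : i + 1 < markers.length
      · by_cases h2 : markers.getD (i + 1) "" = markers.getD i ""
        · -- run continues at i+1: same run end, same tail of the run table
          rw [runsB]
          simp only [h1, dif_pos]
          rw [scanB_eq_scanA]
          have he : scanA markers (markers.getD (i + 1) "") (i + 1 + 1)
              = scanA markers (markers.getD i "") (i + 1) := by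
            rw [h2, scanA_eq_of_hit markers (markers.getD i "") (i + 1) h1 h2]
          rw [he, pairRuns_cons_of_ne _ _ (by rw [h2]; exact hm)]
        · -- new run starts at i+1: A's next step is exactly the next run start
          have he : scanA markers (markers.getD i "") (i + 1) = i + 1 :=
            scanA_eq_of_miss markers (markers.getD i "") (i + 1) (by intro h; exact h2 h.2)
          rw [he]
      · -- i+1 is past the end
        have he : scanA markers (markers.getD i "") (i + 1) = i + 1 :=
          scanA_eq_of_miss markers (markers.getD i "") (i + 1) (by intro h; exact h1 h.1)
        rw [he]
  · rfl
termination_by markers.length - i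
decreasing_by
  all_goals
  · try have t1 : i + 1 ≤ scanA markers "-" i := scanA_gt markers "-" i ‹_› ‹_›
    try have t2 := scanA_ge markers (markers.getD (scanA markers "-" i) "") (scanA markers "-" i + 1)
    omega

-- ===== VERDICT (by name: the statement is the Claim_ definition above) =====
theorem find_adjacent_pairs_spec : Claim_equal_find_adjacent_pairs := by
  intro markers _
  unfold Spec_find_adjacent_pairs find_adjacent_pairs find_adjacent_pairs_alt
  rw [loopA_eq_pairRuns markers 0]
  rw [foldl_zip_eq_pairRuns (runsB markers 0) []]
  simp
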